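-- pv_equiv track=rewrite | github.com/dewalabhi/Intradar-bot | src/strategies/balanced_breakout.py | get_stock_sector
-- ===== SOURCE A (Python) =====
-- def get_stock_sector(symbol):
--     """Get sector classification for Nifty 50 stock"""
--     sectors = {
--         'IT': ['TCS', 'HCLTECH', 'WIPRO', 'TECHM'],
--         'Banking': ['HDFCBANK', 'ICICIBANK', 'SBIN', 'AXISBANK', 'KOTAKBANK', 'INDUSINDBK'],
--         'Energy': ['RELIANCE', 'ONGC', 'BPCL', 'COALINDIA', 'POWERGRID', 'NTPC'],
--         'Auto': ['MARUTI', 'TATAMOTORS', 'M&M', 'BAJAJ-AUTO', 'HEROMOTOCO', 'EICHERMOT'],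
--         'FMCG': ['ITC', 'HINDUNILVR', 'NESTLEIND', 'BRITANNIA', 'TATACONSUM'],
--         'Pharma': ['SUNPHARMA', 'CIPLA', 'DRREDDY', 'DIVISLAB', 'APOLLOHOSP'],
--         'Materials': ['ULTRACEMCO', 'ASIANPAINT', 'JSWSTEEL', 'TATASTEEL', 'HINDALCO', 'GRASIM'],
--         'Financials': ['BAJFINANCE', 'BAJAJFINSV', 'HDFCLIFE', 'SBILIFE', 'LICI'],
--         'Telecom': ['BHARTIARTL'],
--         'Conglomerate': ['LT', 'ADANIPORTS', 'ADANIENT'],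
--         'Consumer': ['TITAN', 'TRENT'],
--         'Utilities': ['UPL']
--     }
--
--     for sector, stocks in sectors.items():
--         if symbol in stocks:
--             return sector
--     return 'Other'
-- ===== SOURCE B (Python) =====
-- # Idiomatic rewrite: one flat symbol->sector dict built once; the per-sector
-- # scan loop is replaced by a single dict lookup with default.
-- _STOCK_SECTOR = {
--     'TCS': 'IT', 'HCLTECH': 'IT', 'WIPRO': 'IT', 'TECHM': 'IT',
--     'HDFCBANK': 'Banking', 'ICICIBANK': 'Banking', 'SBIN': 'Banking',
--     'AXISBANK': 'Banking', 'KOTAKBANK': 'Banking', 'INDUSINDBK': 'Banking',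
--     'RELIANCE': 'Energy', 'ONGC': 'Energy', 'BPCL': 'Energy',
--     'COALINDIA': 'Energy', 'POWERGRID': 'Energy', 'NTPC': 'Energy',
--     'MARUTI': 'Auto', 'TATAMOTORS': 'Auto', 'M&M': 'Auto',
--     'BAJAJ-AUTO': 'Auto', 'HEROMOTOCO': 'Auto', 'EICHERMOT': 'Auto',
--     'ITC': 'FMCG', 'HINDUNILVR': 'FMCG', 'NESTLEIND': 'FMCG',
--     'BRITANNIA': 'FMCG', 'TATACONSUM': 'FMCG',
--     'SUNPHARMA': 'Pharma', 'CIPLA': 'Pharma', 'DRREDDY': 'Pharma',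
--     'DIVISLAB': 'Pharma', 'APOLLOHOSP': 'Pharma',
--     'ULTRACEMCO': 'Materials', 'ASIANPAINT': 'Materials', 'JSWSTEEL': 'Materials',
--     'TATASTEEL': 'Materials', 'HINDALCO': 'Materials', 'GRASIM': 'Materials',
--     'BAJFINANCE': 'Financials', 'BAJAJFINSV': 'Financials', 'HDFCLIFE': 'Financials',
--     'SBILIFE': 'Financials', 'LICI': 'Financials',
--     'BHARTIARTL': 'Telecom',
--     'LT': 'Conglomerate', 'ADANIPORTS': 'Conglomerate', 'ADANIENT': 'Conglomerate',
--     'TITAN': 'Consumer', 'TRENT': 'Consumer',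
--     'UPL': 'Utilities',
-- }
--
-- def get_stock_sector(symbol):
--     """Get sector classification for Nifty 50 stock"""
--     return _STOCK_SECTOR.get(symbol, 'Other')
-- ===== Notes on version B (the rewrite author's own statement) =====
-- stated objective: idiomatic
-- what changed: Replaced the per-sector membership-scan loop with a single flat symbol-to-sector dictionary built once at module level and one dict lookup with the same default sector name.
import Mathlib
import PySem

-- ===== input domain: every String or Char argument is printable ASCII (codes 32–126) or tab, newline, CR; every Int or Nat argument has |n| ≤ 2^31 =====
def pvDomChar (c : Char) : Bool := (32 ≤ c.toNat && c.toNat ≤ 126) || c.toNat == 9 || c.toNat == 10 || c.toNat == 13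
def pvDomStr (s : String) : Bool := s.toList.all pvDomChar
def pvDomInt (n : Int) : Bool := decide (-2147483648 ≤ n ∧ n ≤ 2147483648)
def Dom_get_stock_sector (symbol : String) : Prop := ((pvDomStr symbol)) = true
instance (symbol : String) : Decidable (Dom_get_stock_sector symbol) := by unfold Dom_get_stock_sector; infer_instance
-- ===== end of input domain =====

-- B replaces A's per-sector membership-scan loop by a single flat symbol->sector
-- dictionary and one lookup with default (idiomatic; same observable behaviour).

-- ===== PORT A =====
-- the sectors dict, as an insertion-ordered association list (Python dict)
def pvSectorsA : List (String × List String) := [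
    ("IT", ["TCS", "HCLTECH", "WIPRO", "TECHM"]),
    ("Banking", ["HDFCBANK", "ICICIBANK", "SBIN", "AXISBANK", "KOTAKBANK", "INDUSINDBK"]),
    ("Energy", ["RELIANCE", "ONGC", "BPCL", "COALINDIA", "POWERGRID", "NTPC"]),
    ("Auto", ["MARUTI", "TATAMOTORS", "M&M", "BAJAJ-AUTO", "HEROMOTOCO", "EICHERMOT"]),
    ("FMCG", ["ITC", "HINDUNILVR", "NESTLEIND", "BRITANNIA", "TATACONSUM"]),
    ("Pharma", ["SUNPHARMA", "CIPLA", "DRREDDY", "DIVISLAB", "APOLLOHOSP"]),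
    ("Materials", ["ULTRACEMCO", "ASIANPAINT", "JSWSTEEL", "TATASTEEL", "HINDALCO", "GRASIM"]),
    ("Financials", ["BAJFINANCE", "BAJAJFINSV", "HDFCLIFE", "SBILIFE", "LICI"]),
    ("Telecom", ["BHARTIARTL"]),
    ("Conglomerate", ["LT", "ADANIPORTS", "ADANIENT"]),
    ("Consumer", ["TITAN", "TRENT"]),
    ("Utilities", ["UPL"])]

-- the 'for sector, stocks in sectors.items(): if symbol in stocks: return sector' loop
def pvScanSectors (symbol : String) : List (String × List String) → String
  | [] => "Other"
  | (sector, stocks) :: rest =>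
      if symbol ∈ stocks then sector else pvScanSectors symbol rest

def get_stock_sector (symbol : String) : String :=
  pvScanSectors symbol pvSectorsA

-- ===== PORT B =====
-- the flat module-level dict _STOCK_SECTOR of Source B, literal insertion order
def pvStockSectorB : PySem.Dict String String := PySem.Dict.mk [
    ("TCS", "IT"), ("HCLTECH", "IT"), ("WIPRO", "IT"), ("TECHM", "IT"),
    ("HDFCBANK", "Banking"), ("ICICIBANK", "Banking"), ("SBIN", "Banking"), ("AXISBANK", "Banking"),
    ("KOTAKBANK", "Banking"), ("INDUSINDBK", "Banking"), ("RELIANCE", "Energy"), ("ONGC", "Energy"),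
    ("BPCL", "Energy"), ("COALINDIA", "Energy"), ("POWERGRID", "Energy"), ("NTPC", "Energy"),
    ("MARUTI", "Auto"), ("TATAMOTORS", "Auto"), ("M&M", "Auto"), ("BAJAJ-AUTO", "Auto"),
    ("HEROMOTOCO", "Auto"), ("EICHERMOT", "Auto"), ("ITC", "FMCG"), ("HINDUNILVR", "FMCG"),
    ("NESTLEIND", "FMCG"), ("BRITANNIA", "FMCG"), ("TATACONSUM", "FMCG"), ("SUNPHARMA", "Pharma"),
    ("CIPLA", "Pharma"), ("DRREDDY", "Pharma"), ("DIVISLAB", "Pharma"), ("APOLLOHOSP", "Pharma"),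
    ("ULTRACEMCO", "Materials"), ("ASIANPAINT", "Materials"), ("JSWSTEEL", "Materials"), ("TATASTEEL", "Materials"),
    ("HINDALCO", "Materials"), ("GRASIM", "Materials"), ("BAJFINANCE", "Financials"), ("BAJAJFINSV", "Financials"),
    ("HDFCLIFE", "Financials"), ("SBILIFE", "Financials"), ("LICI", "Financials"), ("BHARTIARTL", "Telecom"),
    ("LT", "Conglomerate"), ("ADANIPORTS", "Conglomerate"), ("ADANIENT", "Conglomerate"), ("TITAN", "Consumer"),
    ("TRENT", "Consumer"), ("UPL", "Utilities")]

def get_stock_sector_alt (symbol : String) : String :=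
  pvStockSectorB.getD symbol "Other"

-- ===== PRECONDITION & SPEC =====
def Spec_get_stock_sector (symbol : String) (out : String) : Prop := out = get_stock_sector_alt symbol
instance (symbol : String) (out : String) : Decidable (Spec_get_stock_sector symbol out) := by unfold Spec_get_stock_sector; infer_instance

-- ===== CLAIM (what is proved, stated in full; the proofs are below) =====
def Claim_equal_get_stock_sector : Prop := ∀ (symbol : String), Dom_get_stock_sector symbol → Spec_get_stock_sector symbol (get_stock_sector symbol)

-- ===== LEMMAS AND PROOFS =====

-- flattening a sector table into a symbol-keyed assoc dict: first-match lookup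
-- in the flat dict is the first-sector-containing-the-symbol scan
theorem pv_flat_scan (s : String) :
    ∀ (tbl : List (String × List String)),
    (PySem.Dict.mk (tbl.flatMap (fun p => p.2.map (fun x => (x, p.1))))).getD s "Other"
      = pvScanSectors s tbl
  | [] => rfl
  | (sec, stocks) :: rest => by
      induction stocks with
      | nil =>
        simpa [pvScanSectors] using pv_flat_scan s rest
      | cons x xs ih =>
        by_cases hx : x = s
        · subst hx
          simp [pvScanSectors, PySem.Dict.getD_eq_get?_getD, PySem.Dict.get?_mk_cons]
        · have hsx : s ≠ x := fun h => hx h.symm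
          simp only [List.flatMap_cons, List.map_cons, List.cons_append,
            PySem.Dict.getD_eq_get?_getD, PySem.Dict.get?_mk_cons, beq_iff_eq,
            if_neg hx] at ih ⊢
          simp only [pvScanSectors, List.mem_cons] at ih ⊢
          rw [ih]
          simp [hsx]

-- B's literal flat dict IS the flattening of A's sector table
theorem pv_flat_eq :
    pvStockSectorB
      = PySem.Dict.mk (pvSectorsA.flatMap (fun p => p.2.map (fun x => (x, p.1)))) := by
  rfl

-- ===== VERDICT (by name: the statement is the Claim_ definition above) =====
theorem get_stock_sector_spec : Claim_equal_get_stock_sector := by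
  intro s _
  show get_stock_sector s = get_stock_sector_alt s
  rw [get_stock_sector, get_stock_sector_alt, pv_flat_eq, pv_flat_scan]
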